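-- pv_equiv track=rewrite | github.com/MeigeJia/ECE-364 | Lab06/foobar.py | leftOrRight
-- ===== SOURCE A (Python) =====
-- def leftOrRight(num, ht):   # None means it is parent, 1 means left and 0 means right
--     maxNum = pow(2, ht)-1
--
--     if num == maxNum:
--         return None
--     temp = num
--     while(1):
--         if(temp == maxNum):
--             return 1
--         elif(temp > maxNum):
--             return 0
--
--         temp = temp*2 + 1
-- ===== SOURCE B (Python) =====
-- def leftOrRight(num, ht):   # None means it is parent, 1 means left and 0 means right
--     m = (1 << ht) - 1          # max label = 2**ht - 1
--     if num == m:
--         return None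
--     if num > m:
--         return 0
--     # num is on the path iff repeatedly doubling num+1 lands exactly on 2**ht,
--     # i.e. iff num+1 divides 2**ht
--     return 1 if (m + 1) % (num + 1) == 0 else 0
-- ===== Notes on version B (the rewrite author's own statement) =====
-- stated objective: faster
-- what changed: Replaces the iterated temp = temp*2+1 doubling loop by a closed-form divisibility test: num is on the left path iff num+1 divides 2**ht.
-- outside the precondition, e.g. on leftOrRight(0, -1): A returns 0, B raises ValueError
import Mathlib
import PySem

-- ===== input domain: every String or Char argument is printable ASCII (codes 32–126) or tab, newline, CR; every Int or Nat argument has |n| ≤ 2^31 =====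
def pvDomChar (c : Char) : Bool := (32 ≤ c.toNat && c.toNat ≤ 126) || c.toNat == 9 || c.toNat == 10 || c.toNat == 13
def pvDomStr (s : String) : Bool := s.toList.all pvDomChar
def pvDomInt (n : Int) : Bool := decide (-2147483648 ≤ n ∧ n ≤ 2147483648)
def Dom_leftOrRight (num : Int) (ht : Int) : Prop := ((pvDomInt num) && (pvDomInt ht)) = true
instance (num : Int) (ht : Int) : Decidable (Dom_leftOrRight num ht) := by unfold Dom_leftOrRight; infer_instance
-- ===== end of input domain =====

-- B replaces A's iterated doubling loop by a single divisibility test (num+1 ∣ 2^ht): faster, O(1) arithmetic ops.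


-- ===== PORT A =====
-- the while(1) loop; fuel only makes it total (under Pre_ the fuel ht.toNat+1 is never exhausted)
def loopA (maxNum : Int) (fuel : Nat) (temp : Int) : Option Int :=
  match fuel with
  | 0 => none
  | f + 1 =>
    if temp = maxNum then some 1
    else if temp > maxNum then some 0
    else loopA maxNum f (temp * 2 + 1)

def leftOrRight (num : Int) (ht : Int) : Option Int :=
  -- pow(2, ht): exact for ht ≥ 0 (guaranteed by Pre_); for ht < 0 Python produces a float
  let maxNum : Int := 2 ^ ht.toNat - 1
  if num = maxNum then none
  else loopA maxNum (ht.toNat + 1) num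

-- ===== PORT B =====
def leftOrRight_alt (num : Int) (ht : Int) : Option Int :=
  -- (1 << ht): exact for ht ≥ 0 (guaranteed by Pre_); Python raises ValueError for ht < 0
  let m : Int := 2 ^ ht.toNat - 1
  if num = m then none
  else if num > m then some 0
  else if PySem.Int.mod (m + 1) (num + 1) = 0 then some 1 else some 0

-- ===== PRECONDITION & SPEC =====
-- Pre_ excludes negative ht, where A's pow(2, ht) is a fractional float (outside the Int
-- convention; B's shift raises ValueError there), and negative num, where A's doubling loop
-- never terminates (temp = -1 is a fixed point and temp < -1 decreases forever).
def Pre_leftOrRight (num : Int) (ht : Int) : Prop := 0 ≤ num ∧ 0 ≤ ht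
instance (num : Int) (ht : Int) : Decidable (Pre_leftOrRight num ht) := by
  unfold Pre_leftOrRight; infer_instance

def pvWitness_leftOrRight : Int × Int := (5, 3)

def Spec_leftOrRight (num : Int) (ht : Int) (out : Option Int) : Prop := out = leftOrRight_alt num ht
instance (num : Int) (ht : Int) (out : Option Int) : Decidable (Spec_leftOrRight num ht out) := by
  unfold Spec_leftOrRight; infer_instance

-- ===== CLAIM (what is proved, stated in full; the proofs are below) =====
def Claim_equal_leftOrRight : Prop := ∀ (num : Int) (ht : Int), Dom_leftOrRight num ht → Pre_leftOrRight num ht → Spec_leftOrRight num ht (leftOrRight num ht)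

-- ===== LEMMAS AND PROOFS =====

-- a divisor of 2^h whose double is still at most 2^h doubles to another divisor
lemma dvd_pow_two_double {d : Int} {h : Nat} (hd : 0 < d) (hdvd : d ∣ (2 ^ h : Int))
    (hlt : 2 * d ≤ 2 ^ h) : 2 * d ∣ (2 ^ h : Int) := by
  lift d to Nat using hd.le with n
  have hn : n ∣ 2 ^ h := by exact_mod_cast hdvd
  obtain ⟨j, hj, rfl⟩ := (Nat.dvd_prime_pow Nat.prime_two).1 hn
  have hcast : ((2 ^ j : Nat) : Int) = (2 : Int) ^ j := by push_cast; ring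
  have hjh : j < h := by
    rcases Nat.lt_or_ge j h with h1 | h1
    · exact h1
    · exfalso
      have hj' : j = h := le_antisymm hj h1
      subst hj'
      rw [hcast] at hlt
      have hpos : (0 : Int) < (2 : Int) ^ j := by positivity
      linarith
  rw [hcast]
  have h2 : (2 : Int) * 2 ^ j = 2 ^ (j + 1) := by ring
  rw [h2]
  exact_mod_cast pow_dvd_pow 2 hjh

-- the loop, given enough fuel, computes the divisibility test
lemma loopA_spec (h : Nat) : ∀ (fuel : Nat) (temp : Int), 0 ≤ temp →
    (2 ^ h : Int) ≤ (temp + 1) * 2 ^ fuel →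
    loopA (2 ^ h - 1) (fuel + 1) temp =
      (if temp = 2 ^ h - 1 then some 1
       else if temp > 2 ^ h - 1 then some 0
       else if (temp + 1) ∣ (2 ^ h : Int) then some 1 else some 0) := by
  intro fuel
  induction fuel with
  | zero =>
    intro temp h0 hf
    simp only [pow_zero, mul_one] at hf
    -- temp ≥ 2^h - 1: the loop returns on its first check
    conv_lhs => rw [loopA]
    rcases eq_or_lt_of_le hf with heq | hlt
    · have hte : temp = 2 ^ h - 1 := by omega
      simp [hte]
    · have hne : temp ≠ 2 ^ h - 1 := by omega
      have hgt : temp > 2 ^ h - 1 := by omega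
      simp [hne, hgt]
  | succ f ih =>
    intro temp h0 hf
    by_cases he : temp = 2 ^ h - 1
    · conv_lhs => rw [loopA]
      simp [he]
    · by_cases hg : temp > 2 ^ h - 1
      · conv_lhs => rw [loopA]
        simp [he, hg]
      · -- temp < 2^h - 1: one doubling step, then the inductive hypothesis
        have hlt : temp < 2 ^ h - 1 := lt_of_le_of_ne (le_of_not_gt hg) he
        have step : loopA (2 ^ h - 1) (f + 1 + 1) temp = loopA (2 ^ h - 1) (f + 1) (temp * 2 + 1) := by
          conv_lhs => rw [loopA]
          simp [he, hg]
        have hf' : (2 ^ h : Int) ≤ (temp * 2 + 1 + 1) * 2 ^ f := by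
          have hr : ((temp + 1) * 2) * 2 ^ f = (temp + 1) * 2 ^ (f + 1) := by ring
          nlinarith [hr, hf]
        rw [step, ih (temp * 2 + 1) (by omega) hf', if_neg he, if_neg hg]
        by_cases he' : temp * 2 + 1 = 2 ^ h - 1
        · -- 2*(temp+1) = 2^h, so temp+1 divides 2^h
          have hdvd : (temp + 1) ∣ (2 ^ h : Int) := ⟨2, by omega⟩
          simp [he', hdvd]
        · by_cases hg' : temp * 2 + 1 > 2 ^ h - 1
          · -- 2*(temp+1) > 2^h: a proper divisor temp+1 < 2^h would force 2*(temp+1) ≤ 2^h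
            have hnd : ¬ (temp + 1) ∣ (2 ^ h : Int) := by
              rintro ⟨q, hq⟩
              have hpos : (0 : Int) < 2 ^ h := by positivity
              have hq0 : 0 < q := by nlinarith
              have hq1 : q ≠ 1 := by intro h1; rw [h1, mul_one] at hq; omega
              have hq2 : 2 ≤ q := by omega
              have : 2 * (temp + 1) ≤ (temp + 1) * q := by nlinarith
              omega
            simp [he', hg', hnd]
          · -- 2*(temp+1) < 2^h: divisibility of temp+1 and of 2*(temp+1) agree
            have hiff : (temp * 2 + 1 + 1) ∣ (2 ^ h : Int) ↔ (temp + 1) ∣ (2 ^ h : Int) := by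
              constructor
              · intro hdd
                exact dvd_trans ⟨2, by ring⟩ hdd
              · intro hdd
                have h2 : temp * 2 + 1 + 1 = 2 * (temp + 1) := by ring
                rw [h2]
                exact dvd_pow_two_double (by omega) hdd (by omega)
            rw [if_neg he', if_neg hg', if_congr hiff rfl rfl]

-- ===== VERDICT (by name: the statement is the Claim_ definition above) =====
theorem leftOrRight_spec : Claim_equal_leftOrRight := by
  intro num ht _ hpre
  obtain ⟨hnum, hht⟩ := hpre
  unfold Spec_leftOrRight leftOrRight leftOrRight_alt
  set h := ht.toNat with hh
  by_cases he : num = 2 ^ h - 1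
  · simp [he]
  · have hfuel : (2 ^ h : Int) ≤ (num + 1) * 2 ^ h := by
      have hpos : (0 : Int) < 2 ^ h := by positivity
      nlinarith
    simp only [he, if_false]
    rw [loopA_spec h h num hnum hfuel, if_neg he]
    by_cases hg : num > 2 ^ h - 1
    · simp [hg]
    · have hmod : (PySem.Int.mod (2 ^ h - 1 + 1) (num + 1) = 0) ↔ (num + 1) ∣ ((2 : Int) ^ h - 1 + 1) :=
        PySem.Int.mod_eq_zero_iff_dvd _ _
      have hcancel : (2 : Int) ^ h - 1 + 1 = 2 ^ h := by ring
      rw [hcancel] at hmod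
      rw [if_neg hg, if_neg hg, if_congr hmod.symm rfl rfl, hcancel]
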